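-- pv_equiv track=rewrite | github.com/CryptoSalamander/Problem_Solving | Programmers/72410.py | solution
-- ===== SOURCE A (Python) =====
-- def solution(new_id):
--     new_id = new_id.lower()
--     answer = ''
--     allow_list = "0123456789abcdefghijklmnopqrstuvwxyz-_."
--     for ch in new_id:
--         if ch in allow_list:
--             answer += ch
--     while(True):
--         if answer.find('..') != -1:
--             answer = answer.replace('..','.')
--         else:
--             break
--     if answer.startswith('.'):
--         answer = answer[1:]
--     if answer.endswith('.'):
--         answer = answer[:-1]
--     if len(answer) == 0:
--         answer += 'a'
--     if len(answer) >= 16: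
--         answer = answer[:15]
--         if answer.endswith('.'):
--             answer = answer[:-1]
--     if len(answer) <= 2:
--         cnt = 3 - len(answer)
--         answer += answer[-1]*cnt
--     return answer
-- ===== SOURCE B (Python) =====
-- def solution(new_id):
--     allow = "0123456789abcdefghijklmnopqrstuvwxyz-_."
--     answer = ''
--     for ch in new_id.lower():
--         if ch in allow and not (ch == '.' and answer.endswith('.')):
--             answer += ch
--     answer = answer.strip('.')
--     if not answer:
--         answer = 'a'
--     answer = answer[:15].strip('.')
--     answer += answer[-1] * (3 - len(answer))
--     return answer
-- ===== Notes on version B (the rewrite author's own statement) =====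
-- stated objective: simpler
-- what changed: A's fixpoint loop of repeated str.replace('..','.') scans is replaced by a single left-to-right pass that never appends a dot immediately after a dot, and A's one-dot strip/truncate/pad conditionals become strip('.')/slice/unconditional-pad expressions.
import Mathlib
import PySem

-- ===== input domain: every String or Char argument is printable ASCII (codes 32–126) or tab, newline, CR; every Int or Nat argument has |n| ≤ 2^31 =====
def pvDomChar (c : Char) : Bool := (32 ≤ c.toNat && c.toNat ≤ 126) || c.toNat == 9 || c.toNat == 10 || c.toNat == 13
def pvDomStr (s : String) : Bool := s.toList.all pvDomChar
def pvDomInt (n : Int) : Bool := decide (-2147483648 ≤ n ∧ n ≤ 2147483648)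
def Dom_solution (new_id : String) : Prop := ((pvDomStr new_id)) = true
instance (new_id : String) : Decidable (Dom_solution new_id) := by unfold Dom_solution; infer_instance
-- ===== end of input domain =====

-- B replaces A's repeated `replace('..','.')` fixpoint loop by a single pass that never
-- appends a dot right after a dot, and the conditional strip/truncate/pad steps by
-- `strip('.')`/slice/pad expressions (objective: simpler); return values are proved equal
-- on all inputs.

-- ===== PORT A =====
-- `pvRep` is the proof-side normal form of ONE Python `replace('..','.')` pass; it and the
-- lemmas up to `pvReplace_dd_lt` exist only to justify termination of the while-loop port
-- `pvDotLoop` below (cited in its `decreasing_by`).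
def pvRep : List Char → List Char
  | [] => []
  | [c] => [c]
  | c :: d :: t => if c = '.' ∧ d = '.' then '.' :: pvRep t else c :: pvRep (d :: t)

theorem pvRep_go_eq (fuel : Nat) : ∀ (l acc : List Char), l.length ≤ fuel →
    PySem.Chars.replace.go ['.', '.'] ['.'] fuel l acc = acc.reverse ++ pvRep l := by
  induction fuel with
  | zero =>
    intro l acc h
    have : l = [] := List.eq_nil_of_length_eq_zero (Nat.le_zero.mp h)
    subst this; simp [PySem.Chars.replace.go, pvRep]
  | succ n ih =>
    intro l acc h
    match l with
    | [] => simp [PySem.Chars.replace.go, pvRep]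
    | [c] =>
      have hp : (['.', '.'] : List Char).isPrefixOf [c] = false := by
        simp [List.isPrefixOf]
      simp only [PySem.Chars.replace.go, hp]
      rw [ih [] (c :: acc) (by simp)]
      simp [pvRep]
    | c :: d :: t =>
      by_cases hcd : c = '.' ∧ d = '.'
      · obtain ⟨rfl, rfl⟩ := hcd
        have hp : (['.', '.'] : List Char).isPrefixOf ('.' :: '.' :: t) = true := by
          simp [List.isPrefixOf]
        simp only [PySem.Chars.replace.go, hp, if_pos]
        rw [show List.drop (['.', '.'] : List Char).length ('.' :: '.' :: t) = t from rfl,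
            ih t (['.'].reverse ++ acc) (by simp at h ⊢; omega)]
        simp [pvRep]
      · have hp : (['.', '.'] : List Char).isPrefixOf (c :: d :: t) = false := by
          simp only [List.isPrefixOf, Bool.and_eq_false_iff, beq_eq_false_iff_ne, ne_eq]
          by_cases h1 : c = '.'
          · subst h1; right; left; intro h2; exact hcd ⟨rfl, h2.symm⟩
          · left; intro h; exact h1 h.symm
        simp only [PySem.Chars.replace.go, hp]
        rw [ih (d :: t) (c :: acc) (by simp at h ⊢; omega)]
        simp [pvRep, hcd]

theorem pvReplace_eq_pvRep (l : List Char) :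
    PySem.Chars.replace l ['.', '.'] ['.'] = pvRep l := by
  rw [PySem.Chars.replace]
  simp only [List.isEmpty_iff, reduceCtorEq, if_false]
  rw [pvRep_go_eq l.length l [] le_rfl]
  simp

theorem pvRep_length_le (l : List Char) : (pvRep l).length ≤ l.length := by
  fun_induction pvRep <;> simp_all <;> omega

theorem pvRep_length_lt (l : List Char) (h : ['.', '.'] <:+: l) :
    (pvRep l).length < l.length := by
  fun_induction pvRep with
  | case1 => simp at h
  | case2 c =>
    exfalso
    have := h.length_le; simp at this
  | case3 c d t hcd ih =>
    obtain ⟨rfl, rfl⟩ := hcd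
    have := pvRep_length_le t
    simp; omega
  | case4 c d t hcd ih =>
    rw [List.infix_cons_iff] at h
    rcases h with h | h
    · exfalso
      rcases h with ⟨s, hs⟩
      cases hs
      exact hcd ⟨rfl, rfl⟩
    · have := ih h
      simp at this ⊢; omega

theorem pvReplace_dd_lt (l : List Char) (h : PySem.Chars.find l ['.', '.'] ≠ -1) :
    (PySem.Chars.replace l ['.', '.'] ['.']).length < l.length := by
  rw [pvReplace_eq_pvRep]
  apply pvRep_length_lt
  by_contra hc
  exact h ((PySem.Chars.find_eq_neg_one_iff l ['.', '.']).mpr hc)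

-- `while True: if answer.find('..') != -1: answer = answer.replace('..','.') else: break`
def pvDotLoop (l : List Char) : List Char :=
  if PySem.Chars.find l ['.', '.'] ≠ -1 then
    pvDotLoop (PySem.Chars.replace l ['.', '.'] ['.'])
  else l
termination_by l.length
decreasing_by exact pvReplace_dd_lt _ (by assumption)

def solution (new_id : String) : String :=
  let s := (PySem.Str.lower new_id).toList
  let allow := "0123456789abcdefghijklmnopqrstuvwxyz-_.".toList
  let ans := s.foldl (fun acc ch => if PySem.Chars.isIn [ch] allow then acc ++ [ch] else acc) []
  let ans := pvDotLoop ans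
  let ans := if PySem.Chars.startswith ans ['.'] then PySem.Chars.slice ans (some 1) none else ans
  let ans := if PySem.Chars.endswith ans ['.'] then PySem.Chars.slice ans none (some (-1)) else ans
  let ans := if ans.length == 0 then ans ++ ['a'] else ans
  let ans := if 16 ≤ ans.length then
      let a2 := PySem.Chars.slice ans none (some 15)
      if PySem.Chars.endswith a2 ['.'] then PySem.Chars.slice a2 none (some (-1)) else a2
    else ans
  let ans := if ans.length ≤ 2 then
      -- `answer[-1]`: answer is provably nonempty here, so pyGet? is some and getD is never taken
      ans ++ PySem.List.pyRepeat [(PySem.Chars.pyGet? ans (-1)).getD 'a'] (3 - (ans.length : Int))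
    else ans
  String.ofList ans

-- ===== PORT B =====
def solution_alt (new_id : String) : String :=
  let allow := "0123456789abcdefghijklmnopqrstuvwxyz-_.".toList
  let ans := (PySem.Str.lower new_id).toList.foldl
      (fun acc ch =>
        if PySem.Chars.isIn [ch] allow && !(ch == '.' && PySem.Chars.endswith acc ['.']) then
          acc ++ [ch]
        else acc) []
  let ans := PySem.Chars.stripChars ans ['.']
  let ans := if ans.isEmpty then ['a'] else ans
  let ans := PySem.Chars.stripChars (PySem.Chars.slice ans none (some 15)) ['.']
  -- `answer[-1]`: answer is provably nonempty here, so pyGet? is some and getD is never taken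
  let ans := ans ++ PySem.List.pyRepeat [(PySem.Chars.pyGet? ans (-1)).getD 'a'] (3 - (ans.length : Int))
  String.ofList ans

-- ===== PRECONDITION & SPEC =====
def Spec_solution (new_id : String) (out : String) : Prop := out = solution_alt new_id
instance (new_id : String) (out : String) : Decidable (Spec_solution new_id out) := by unfold Spec_solution; infer_instance

-- ===== CLAIM (what is proved, stated in full; the proofs are below) =====
def Claim_equal_solution : Prop := ∀ (new_id : String), Dom_solution new_id → Spec_solution new_id (solution new_id)

-- ===== LEMMAS AND PROOFS =====

def pvColP : Bool → List Char → List Char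
  | _, [] => []
  | b, c :: t =>
    if c = '.' then (if b then pvColP true t else '.' :: pvColP true t)
    else c :: pvColP false t

theorem pvColP_rep (l : List Char) : ∀ b, pvColP b (pvRep l) = pvColP b l := by
  fun_induction pvRep with
  | case1 => intro b; rfl
  | case2 c => intro b; rfl
  | case3 c d t hcd ih =>
    obtain ⟨rfl, rfl⟩ := hcd
    intro b
    by_cases hb : b <;> simp [pvColP, hb, ih]
  | case4 c d t hcd ih =>
    intro b
    by_cases hc : c = '.'
    · subst hc
      by_cases hb : b <;> simp [pvColP, hb, ih]
    · simp [pvColP, hc, ih]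

theorem pvColP_fix (l : List Char) (h : ¬ ['.', '.'] <:+: l) :
    ∀ b, (b = true → l.head? ≠ some '.') → pvColP b l = l := by
  induction l with
  | nil => intro b _; rfl
  | cons c t ih =>
    intro b hb
    have ht : ¬ ['.', '.'] <:+: t := fun hi => h (hi.trans (List.suffix_cons c t).isInfix)
    have htl : ∀ b', (b' = true → t.head? ≠ some '.') → pvColP b' t = t := ih ht
    by_cases hc : c = '.'
    · subst hc
      have hthd : t.head? ≠ some '.' := by
        intro hhd
        cases t with
        | nil => simp at hhd
        | cons d t' =>
          simp at hhd
          subst hhd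
          exact h ⟨[], t', rfl⟩
      have hb' : b = false := by
        cases b
        · rfl
        · exact absurd (show (('.' :: t) : List Char).head? = some '.' from rfl) (hb rfl)
      subst hb'
      show (if ('.' : Char) = '.' then (if false then pvColP true t else '.' :: pvColP true t) else _) = _
      rw [if_pos rfl, if_neg (by simp), htl true (fun _ => hthd)]
    · show (if c = '.' then _ else c :: pvColP false t) = _
      rw [if_neg hc, htl false (by simp)]


theorem pvDotLoop_eq (l : List Char) : pvDotLoop l = pvColP false l := by
  fun_induction pvDotLoop with
  | case1 l h ih =>
    rw [ih, pvReplace_eq_pvRep, pvColP_rep]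
  | case2 l h =>
    rw [not_not] at h
    rw [pvColP_fix l ((PySem.Chars.find_eq_neg_one_iff l ['.', '.']).mp h) false (by simp)]

theorem pvEndswith_concat (a : List Char) (x : Char) :
    PySem.Chars.endswith (a ++ [x]) ['.'] = (x == '.') := by
  simp [PySem.Chars.endswith, List.isSuffixOf, List.isPrefixOf]
  exact eq_comm

theorem pvFoldB_eq (l : List Char) : ∀ acc,
    l.foldl (fun acc c => if c == '.' && PySem.Chars.endswith acc ['.'] then acc else acc ++ [c]) acc
      = acc ++ pvColP (PySem.Chars.endswith acc ['.']) l := by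
  induction l with
  | nil => intro acc; simp [pvColP]
  | cons c t ih =>
    intro acc
    simp only [List.foldl_cons]
    by_cases hc : c = '.'
    · subst hc
      by_cases he : PySem.Chars.endswith acc ['.'] = true
      · rw [if_pos (by simp [he]), ih acc, he]
        show _ = acc ++ pvColP true ('.' :: t)
        simp [pvColP]
      · rw [if_neg (by simp [he]), ih (acc ++ ['.']), pvEndswith_concat]
        rw [Bool.not_eq_true] at he
        rw [he]
        show _ = acc ++ pvColP false ('.' :: t)
        simp [pvColP]
    · rw [if_neg (by simp [hc]), ih (acc ++ [c]), pvEndswith_concat]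
      have : (c == '.') = false := by simp [hc]
      rw [this]
      have h2 : pvColP (PySem.Chars.endswith acc ['.']) (c :: t) = c :: pvColP false t := by
        simp [pvColP, hc]
      rw [h2]; simp

theorem pvColP_no_dd (l : List Char) :
    (∀ b, ¬ ['.', '.'] <:+: pvColP b l) ∧ (pvColP true l).head? ≠ some '.' := by
  induction l with
  | nil => exact ⟨fun b => by simp [pvColP], by simp [pvColP]⟩
  | cons c t ih =>
    obtain ⟨ihdd, ihhd⟩ := ih
    by_cases hc : c = '.'
    · subst hc
      have htrue : pvColP true ('.' :: t) = pvColP true t := by simp [pvColP]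
      have hfalse : pvColP false ('.' :: t) = '.' :: pvColP true t := by simp [pvColP]
      refine ⟨fun b => ?_, by rw [htrue]; exact ihhd⟩
      cases b
      · rw [hfalse, List.infix_cons_iff]
        rintro (⟨s, hs⟩ | hi)
        · cases t' : pvColP true t with
          | nil => rw [t'] at hs; simp at hs
          | cons d t'' =>
            rw [t'] at hs
            simp at hs
            apply ihhd
            rw [t', ← hs.1]
            rfl
        · exact ihdd true hi
      · rw [htrue]; exact ihdd true
    · have hb : ∀ b, pvColP b (c :: t) = c :: pvColP false t := by
        intro b; simp [pvColP, hc]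
      refine ⟨fun b => ?_, by rw [hb]; simpa using hc⟩
      rw [hb, List.infix_cons_iff]
      rintro (⟨s, hs⟩ | hi)
      · injection hs with h1 _; exact hc h1.symm
      · exact ihdd false hi

theorem pvDropWhile_dot (m : List Char) (h : ¬ ['.', '.'] <:+: m) :
    m.dropWhile (fun c => (['.'] : List Char).contains c) =
      if PySem.Chars.startswith m ['.'] then m.tail else m := by
  cases m with
  | nil => simp
  | cons c t =>
    by_cases hc : c = '.'
    · subst hc
      have hsw : PySem.Chars.startswith ('.' :: t) ['.'] = true := by
        simp [PySem.Chars.startswith, List.isPrefixOf]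
      rw [if_pos hsw]
      cases t with
      | nil => simp
      | cons d t' =>
        have hd : d ≠ '.' := by
          intro hd; subst hd
          exact h ⟨[], t', rfl⟩
        simp [List.dropWhile, hd]
    · have hsw : PySem.Chars.startswith (c :: t) ['.'] = false := by
        simp [PySem.Chars.startswith, List.isPrefixOf]
        intro hx; exact hc hx.symm
      rw [if_neg (by simp [hsw])]
      simp [List.dropWhile, hc]


theorem pvInfix_reverse (x : List Char) :
    (['.', '.'] : List Char) <:+: x.reverse ↔ (['.', '.'] : List Char) <:+: x := by
  constructor
  · intro h; exact List.reverse_infix.mp h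
  · intro h
    have : (['.', '.'] : List Char).reverse <:+: x.reverse := List.reverse_infix.mpr h
    simpa using this

theorem pvEnd_eq_startRev (x : List Char) :
    PySem.Chars.endswith x ['.'] = PySem.Chars.startswith x.reverse ['.'] := by
  simp [PySem.Chars.endswith, PySem.Chars.startswith, List.isSuffixOf]

theorem pvStrip_eq (m : List Char) (h : ¬ ['.', '.'] <:+: m) :
    PySem.Chars.stripChars m ['.'] =
      (let s1 := if PySem.Chars.startswith m ['.'] then m.tail else m
       if PySem.Chars.endswith s1 ['.'] then s1.dropLast else s1) := by
  show (List.dropWhile _ (List.dropWhile _ m).reverse).reverse = _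
  rw [pvDropWhile_dot m h]
  set s1 := if PySem.Chars.startswith m ['.'] then m.tail else m with hs1
  have h1 : ¬ ['.', '.'] <:+: s1 := by
    rw [hs1]
    split
    · exact fun hi => h (hi.trans (List.tail_suffix m).isInfix)
    · exact h
  rw [pvDropWhile_dot s1.reverse ((fun hi => h1 ((pvInfix_reverse s1).mp hi)))]
  rw [← pvEnd_eq_startRev]
  split
  · rw [List.tail_reverse, List.reverse_reverse]
    simp_all
  · rw [List.reverse_reverse]
    simp_all

theorem pvSw_head (x : List Char) :
    PySem.Chars.startswith x ['.'] = (x.head? == some '.') := by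
  cases x with
  | nil => rfl
  | cons c t =>
    simp [PySem.Chars.startswith, List.isPrefixOf]
    exact eq_comm

theorem pvStart_after (m : List Char) (h : ¬ ['.', '.'] <:+: m) :
    PySem.Chars.startswith (if PySem.Chars.startswith m ['.'] then m.tail else m) ['.'] = false := by
  split
  · rename_i hsw
    cases m with
    | nil => rfl
    | cons c t =>
      rw [pvSw_head] at hsw
      simp at hsw
      subst hsw
      cases t with
      | nil => rfl
      | cons d t' =>
        rw [pvSw_head]
        simp only [List.tail_cons, List.head?_cons, beq_eq_false_iff_ne, ne_eq, Option.some.injEq]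
        intro hd; subst hd
        exact h ⟨[], t', rfl⟩
  · rename_i hsw
    simpa using hsw

theorem pvEnd_after (s1 : List Char) (h : ¬ ['.', '.'] <:+: s1) :
    PySem.Chars.endswith (if PySem.Chars.endswith s1 ['.'] then s1.dropLast else s1) ['.'] = false := by
  have hrev : (if PySem.Chars.endswith s1 ['.'] then s1.dropLast else s1).reverse =
      (if PySem.Chars.startswith s1.reverse ['.'] then s1.reverse.tail else s1.reverse) := by
    rw [← pvEnd_eq_startRev]
    split
    · rw [List.tail_reverse]
    · rfl
  rw [pvEnd_eq_startRev, hrev]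
  exact pvStart_after s1.reverse (fun hi => h ((pvInfix_reverse s1).mp hi))

theorem pvStart_dropLast (l : List Char) (h : PySem.Chars.startswith l ['.'] = false) :
    PySem.Chars.startswith (if PySem.Chars.endswith l ['.'] then l.dropLast else l) ['.'] = false := by
  split
  · cases l with
    | nil => rfl
    | cons c t =>
      cases t with
      | nil => rfl
      | cons d t' =>
        rw [pvSw_head] at h ⊢
        simpa using (by simpa using h)
  · exact h

theorem pvStart_take (l : List Char) (n : Nat) (h : PySem.Chars.startswith l ['.'] = false) :
    PySem.Chars.startswith (l.take n) ['.'] = false := by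
  cases l with
  | nil => simp [pvSw_head]
  | cons c t =>
    cases n with
    | zero => rfl
    | succ k =>
      rw [pvSw_head] at h ⊢
      simpa using (by simpa using h)

theorem pvPad (v : List Char) (c : Char) :
    (if v.length ≤ 2 then v ++ PySem.List.pyRepeat [c] (3 - (v.length : Int)) else v)
      = v ++ PySem.List.pyRepeat [c] (3 - (v.length : Int)) := by
  split
  · rfl
  · rename_i hv
    rw [PySem.List.pyRepeat_singleton]
    have : ((3 - (v.length : Int)).toNat) = 0 := by omega
    rw [this]
    simp

theorem pvTail (t : List Char) (hndd : ¬ ['.', '.'] <:+: t)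
    (hsw : PySem.Chars.startswith t ['.'] = false) (hew : PySem.Chars.endswith t ['.'] = false) :
    (let a4 := if t.length == 0 then t ++ ['a'] else t
     let a5 := if 16 ≤ a4.length then
         let u := PySem.Chars.slice a4 none (some 15)
         if PySem.Chars.endswith u ['.'] then PySem.Chars.slice u none (some (-1)) else u
       else a4
     if a5.length ≤ 2 then
       a5 ++ PySem.List.pyRepeat [(PySem.Chars.pyGet? a5 (-1)).getD 'a'] (3 - (a5.length : Int))
     else a5)
    =
    (let b2 := if t.isEmpty then ['a'] else t
     let b3 := PySem.Chars.stripChars (PySem.Chars.slice b2 none (some 15)) ['.']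
     b3 ++ PySem.List.pyRepeat [(PySem.Chars.pyGet? b3 (-1)).getD 'a'] (3 - (b3.length : Int))) := by
  simp only []
  have ha4 : (if t.length == 0 then t ++ ['a'] else t) = (if t.isEmpty then ['a'] else t) := by
    cases t <;> simp
  rw [ha4]
  set t2 := if t.isEmpty then ['a'] else t with ht2
  have hndd2 : ¬ ['.', '.'] <:+: t2 := by
    rw [ht2]; split
    · decide
    · exact hndd
  have hsw2 : PySem.Chars.startswith t2 ['.'] = false := by
    rw [ht2]; split
    · decide
    · exact hsw
  have hew2 : PySem.Chars.endswith t2 ['.'] = false := by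
    rw [ht2]; split
    · decide
    · exact hew
  have hu : PySem.Chars.slice t2 none (some 15) = t2.take 15 := by
    have := PySem.List.slice_to (xs := t2) (b := 15) (by norm_num)
    simpa using this
  have hundd : ¬ ['.', '.'] <:+: t2.take 15 :=
    fun hi => hndd2 (hi.trans (List.take_prefix 15 t2).isInfix)
  have husw : PySem.Chars.startswith (t2.take 15) ['.'] = false := pvStart_take t2 15 hsw2
  have hB3 : PySem.Chars.stripChars (t2.take 15) ['.']
      = (if PySem.Chars.endswith (t2.take 15) ['.'] then (t2.take 15).dropLast else t2.take 15) := by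
    rw [pvStrip_eq _ hundd]
    simp only [husw, Bool.false_eq_true, if_false]
  have htrunc :
      (if 16 ≤ t2.length then
         let u := PySem.Chars.slice t2 none (some 15)
         if PySem.Chars.endswith u ['.'] then PySem.Chars.slice u none (some (-1)) else u
       else t2)
      = PySem.Chars.stripChars (PySem.Chars.slice t2 none (some 15)) ['.'] := by
    rw [hu, hB3]
    split
    · simp only []
      split
      · simp [PySem.List.slice_to_neg_one]
      · rfl
    · rename_i h16
      have hle : t2.length ≤ 15 := by omega
      rw [List.take_of_length_le hle, hew2]
      simp
  rw [htrunc]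
  exact pvPad _ _

theorem pvMain (l allow : List Char) :
    (let a0 := l.foldl (fun acc ch => if PySem.Chars.isIn [ch] allow then acc ++ [ch] else acc) []
     let a1 := pvDotLoop a0
     let a2 := if PySem.Chars.startswith a1 ['.'] then PySem.Chars.slice a1 (some 1) none else a1
     let a3 := if PySem.Chars.endswith a2 ['.'] then PySem.Chars.slice a2 none (some (-1)) else a2
     let a4 := if a3.length == 0 then a3 ++ ['a'] else a3
     let a5 := if 16 ≤ a4.length then
         let u := PySem.Chars.slice a4 none (some 15)
         if PySem.Chars.endswith u ['.'] then PySem.Chars.slice u none (some (-1)) else u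
       else a4
     if a5.length ≤ 2 then
       a5 ++ PySem.List.pyRepeat [(PySem.Chars.pyGet? a5 (-1)).getD 'a'] (3 - (a5.length : Int))
     else a5)
    =
    (let b0 := l.foldl (fun acc ch =>
         if PySem.Chars.isIn [ch] allow && !(ch == '.' && PySem.Chars.endswith acc ['.']) then
           acc ++ [ch] else acc) []
     let b1 := PySem.Chars.stripChars b0 ['.']
     let b2 := if b1.isEmpty then ['a'] else b1
     let b3 := PySem.Chars.stripChars (PySem.Chars.slice b2 none (some 15)) ['.']
     b3 ++ PySem.List.pyRepeat [(PySem.Chars.pyGet? b3 (-1)).getD 'a'] (3 - (b3.length : Int))) := by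
  simp only []
  have hA0 : l.foldl (fun acc ch => if PySem.Chars.isIn [ch] allow then acc ++ [ch] else acc) []
      = l.filter (fun ch => PySem.Chars.isIn [ch] allow) := by
    simpa using PySem.List.foldl_append_if_eq_filter (fun ch => PySem.Chars.isIn [ch] allow) l ([] : List Char)
  have hB0 : l.foldl (fun acc ch =>
      if PySem.Chars.isIn [ch] allow && !(ch == '.' && PySem.Chars.endswith acc ['.']) then
        acc ++ [ch] else acc) []
      = pvColP false (l.filter (fun ch => PySem.Chars.isIn [ch] allow)) := by
    have hcong : l.foldl (fun acc ch =>
        if PySem.Chars.isIn [ch] allow && !(ch == '.' && PySem.Chars.endswith acc ['.']) then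
          acc ++ [ch] else acc) []
        = l.foldl (fun acc ch => if PySem.Chars.isIn [ch] allow then
            (if ch == '.' && PySem.Chars.endswith acc ['.'] then acc else acc ++ [ch]) else acc) [] := by
      apply PySem.List.foldl_congr_mem
      intro acc ch _
      by_cases h1 : PySem.Chars.isIn [ch] allow = true
      · by_cases h2 : (ch == '.' && PySem.Chars.endswith acc ['.']) = true
        · simp [h1, h2]
        · simp only [Bool.not_eq_true] at h2
          simp [h1, h2]
      · simp only [Bool.not_eq_true] at h1
        simp [h1]
    rw [hcong, PySem.List.foldl_if_eq_foldl_filter, pvFoldB_eq]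
    rfl
  rw [hA0, hB0, pvDotLoop_eq]
  set q := pvColP false (l.filter (fun ch => PySem.Chars.isIn [ch] allow)) with hqdef
  have hq : ¬ ['.', '.'] <:+: q := (pvColP_no_dd _).1 false
  have hns1 : ¬ ['.', '.'] <:+: (if PySem.Chars.startswith q ['.'] then q.tail else q) := by
    split
    · exact fun hi => hq (hi.trans (List.tail_suffix q).isInfix)
    · exact hq
  have hstrip : PySem.Chars.stripChars q ['.']
      = (if PySem.Chars.endswith (if PySem.Chars.startswith q ['.'] then q.tail else q) ['.'] then
           (if PySem.Chars.startswith q ['.'] then q.tail else q).dropLast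
         else (if PySem.Chars.startswith q ['.'] then q.tail else q)) := by
    rw [pvStrip_eq q hq]
  have ha2 : (if PySem.Chars.startswith q ['.'] then PySem.Chars.slice q (some 1) none else q)
      = (if PySem.Chars.startswith q ['.'] then q.tail else q) := by
    split
    · simp [PySem.List.slice_from_one]
    · rfl
  have hgen2 : ∀ s1 : List Char,
      (if PySem.Chars.endswith s1 ['.'] then PySem.Chars.slice s1 none (some (-1)) else s1)
      = (if PySem.Chars.endswith s1 ['.'] then s1.dropLast else s1) := by
    intro s1
    split
    · simp [PySem.List.slice_to_neg_one]
    · rfl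
  rw [ha2, hgen2 (if PySem.Chars.startswith q ['.'] then q.tail else q), ← hstrip]
  have hgen3 : ∀ s1 : List Char, ¬ ['.', '.'] <:+: s1 →
      ¬ ['.', '.'] <:+: (if PySem.Chars.endswith s1 ['.'] then s1.dropLast else s1) := by
    intro s1 h
    split
    · exact fun hi => h (hi.trans (List.dropLast_prefix _).isInfix)
    · exact h
  have hndd_t : ¬ ['.', '.'] <:+: PySem.Chars.stripChars q ['.'] := by
    rw [hstrip]
    exact hgen3 _ hns1
  have hsw_t : PySem.Chars.startswith (PySem.Chars.stripChars q ['.']) ['.'] = false := by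
    rw [hstrip]
    exact pvStart_dropLast _ (pvStart_after q hq)
  have hew_t : PySem.Chars.endswith (PySem.Chars.stripChars q ['.']) ['.'] = false := by
    rw [hstrip]
    exact pvEnd_after _ hns1
  exact pvTail _ hndd_t hsw_t hew_t

-- ===== VERDICT (by name: the statement is the Claim_ definition above) =====
theorem solution_spec : Claim_equal_solution := by
  intro new_id _
  unfold Spec_solution solution solution_alt
  exact congrArg String.ofList (pvMain ((PySem.Str.lower new_id).toList)
    ("0123456789abcdefghijklmnopqrstuvwxyz-_.".toList))
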